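-- pv_equiv track=rewrite | github.com/NarenOO3/volta_multi_robot_simulation | scripts/robots_launch_generator.py | generate_launch_file
-- ===== SOURCE A (Python) =====
-- def generate_robot_launch(robot_num, init_pose):
--     return f"""
--
--     <group ns="robot{robot_num}">
--       <param name="tf_prefix" value="robot{robot_num}_tf" />
--       <include file="$(find volta_multi_robot_simulation)/launch/one_robot.launch">
--         <arg name="init_pose" value="{init_pose}" />
--         <arg name="robot_name"  value="Robot{robot_num}" />
--       </include>
--     </group>
--
--     """
--
-- def anticlockwise_spiral(n):
--     if n <= 0:
--         return []
--
--     x, y = 0, 0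
--     dx, dy = 0, -1
--     result = []
--
--     for _ in range(n):
--         result.append((x, y))
--         if x == y or (x < 0 and x == -y) or (x > 0 and x == 1 - y):
--             dx, dy = -dy, dx
--         x, y = x + dx, y + dy
--
--     return result
--
-- def fill_init_poses(n):
--     spiral_coords = anticlockwise_spiral(n)
--     init_poses = []
--
--     for coord in spiral_coords:
--         x, y = coord
--         init_poses.append("-x {} -y {} -z 0".format(x, y))
--
--     return init_poses
--
-- def generate_launch_file(num_robots):
--     init_poses = fill_init_poses(num_robots)
--     launch_code = """
--     <launch>
--         <!-- No namespace here as we will share this description. Access with slash at the beginning -->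
--         <param name="robot_description" command="xacro \'$(find volta_multi_robot_simulation)/urdf/volta.urdf.xacro\'"/>
--         """
--
--     for i in range(num_robots):
--         launch_code += generate_robot_launch(i + 1, init_poses[i % len(init_poses)])
--
--     launch_code += "</launch>\n"
--
--     return launch_code
-- ===== SOURCE B (Python) =====
-- def generate_launch_file(num_robots):
--     # Segment-based spiral walk: directions cycle right, up, left, down;
--     # segment lengths 1,1,2,2,3,3,... (increment after every second leg).
--     poses = []
--     if num_robots > 0:
--         dirs = ((1, 0), (0, 1), (-1, 0), (0, -1))
--         x = y = 0
--         d = 0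
--         seg = 1
--         second = False
--         poses.append("-x 0 -y 0 -z 0")
--         while len(poses) < num_robots:
--             dx, dy = dirs[d]
--             for _ in range(seg):
--                 if len(poses) >= num_robots:
--                     break
--                 x += dx
--                 y += dy
--                 poses.append("-x {} -y {} -z 0".format(x, y))
--             d = (d + 1) % 4
--             if second:
--                 seg += 1
--             second = not second
--
--     blocks = ["""
--
--     <group ns="robot{0}">
--       <param name="tf_prefix" value="robot{0}_tf" />
--       <include file="$(find volta_multi_robot_simulation)/launch/one_robot.launch">
--         <arg name="init_pose" value="{1}" />
--         <arg name="robot_name"  value="Robot{0}" />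
--       </include>
--     </group>
--
--     """.format(i, pose) for i, pose in enumerate(poses, 1)]
--
--     return """
--     <launch>
--         <!-- No namespace here as we will share this description. Access with slash at the beginning -->
--         <param name="robot_description" command="xacro \'$(find volta_multi_robot_simulation)/urdf/volta.urdf.xacro\'"/>
--         """ + "".join(blocks) + "</launch>\n"
-- ===== Notes on version B (the rewrite author's own statement) =====
-- stated objective: alternative
-- what changed: The per-step turning-predicate spiral is replaced by a segment-based spiral walk (direction cycling right/up/left/down with segment lengths 1,1,2,2,3,3,...), and the assembly loop with its i % len(init_poses) indexing is replaced by a join over the enumerated pose list.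
import Mathlib
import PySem

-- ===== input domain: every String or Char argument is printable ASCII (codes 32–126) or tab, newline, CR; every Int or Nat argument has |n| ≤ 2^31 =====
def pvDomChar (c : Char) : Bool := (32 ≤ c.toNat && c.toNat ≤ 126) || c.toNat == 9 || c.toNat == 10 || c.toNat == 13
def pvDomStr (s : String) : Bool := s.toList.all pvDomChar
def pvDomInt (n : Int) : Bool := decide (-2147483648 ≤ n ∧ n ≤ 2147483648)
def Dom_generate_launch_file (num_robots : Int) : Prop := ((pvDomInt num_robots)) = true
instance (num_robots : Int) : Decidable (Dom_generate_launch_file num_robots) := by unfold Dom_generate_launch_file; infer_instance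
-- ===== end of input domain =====

-- B replaces the turning-predicate spiral by a segment-based spiral walk and the
-- range/modulo-indexed assembly loop by a join over the enumerated pose list (alternative).

-- ===== PORT A =====
def generate_robot_launch (robot_num : Int) (init_pose : String) : String :=
  "\n\n    <group ns=\"robot" ++ PySem.Int.toStr robot_num ++
  "\">\n      <param name=\"tf_prefix\" value=\"robot" ++ PySem.Int.toStr robot_num ++
  "_tf\" />\n      <include file=\"$(find volta_multi_robot_simulation)/launch/one_robot.launch\">\n        <arg name=\"init_pose\" value=\"" ++ init_pose ++
  "\" />\n        <arg name=\"robot_name\"  value=\"Robot" ++ PySem.Int.toStr robot_num ++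
  "\" />\n      </include>\n    </group>\n      \n    "

-- the 'for _ in range(n)' loop of anticlockwise_spiral, as structural recursion on the trip count
def aSpiralGo : Nat → Int → Int → Int → Int → List (Int × Int)
  | 0, _, _, _, _ => []
  | m + 1, x, y, dx, dy =>
    let p : Int × Int :=
      if x = y ∨ (x < 0 ∧ x = -y) ∨ (x > 0 ∧ x = 1 - y) then (-dy, dx) else (dx, dy)
    (x, y) :: aSpiralGo m (x + p.1) (y + p.2) p.1 p.2

def anticlockwise_spiral (n : Int) : List (Int × Int) :=
  if n ≤ 0 then [] else aSpiralGo n.toNat 0 0 0 (-1)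

def fill_init_poses (n : Int) : List String :=
  (anticlockwise_spiral n).map (fun c =>
    "-x " ++ PySem.Int.toStr c.1 ++ " -y " ++ PySem.Int.toStr c.2 ++ " -z 0")

def generate_launch_file (num_robots : Int) : String :=
  let init_poses := fill_init_poses num_robots
  let launch_code : String :=
    "\n    <launch>\n        <!-- No namespace here as we will share this description. Access with slash at the beginning -->\n        <param name=\"robot_description\" command=\"xacro '$(find volta_multi_robot_simulation)/urdf/volta.urdf.xacro'\"/>\n        "
  -- init_poses[i % len(init_poses)]: in every executed iteration 0 ≤ i < len(init_poses),
  -- so the lookup always hits; the default "" of pyGetD is never used (exact)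
  let launch_code :=
    (PySem.List.pyRange 0 num_robots 1).foldl
      (fun acc i =>
        acc ++ generate_robot_launch (i + 1)
          (PySem.List.pyGetD init_poses (PySem.Int.mod i (init_poses.length : Int)) ""))
      launch_code
  launch_code ++ "</launch>\n"

-- ===== PORT B =====
def bPose (x y : Int) : String :=
  "-x " ++ PySem.Int.toStr x ++ " -y " ++ PySem.Int.toStr y ++ " -z 0"

def bDirs (d : Nat) : Int × Int :=
  PySem.List.pyGetD [(1, 0), (0, 1), (-1, 0), (0, -1)] (d : Int) (0, 0)

-- inner 'for _ in range(seg)' with its break: emits at most `s` steps, stops when `r` points remain to be allowed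
def bSegGo : Nat → Nat → Int → Int → Int → Int → List String × Int × Int
  | _, 0, x, y, _, _ => ([], x, y)
  | 0, _, x, y, _, _ => ([], x, y)
  | s + 1, r + 1, x, y, dx, dy =>
    let x' := x + dx
    let y' := y + dy
    let t := bSegGo s r x' y' dx dy
    (bPose x' y' :: t.1, t.2)

-- outer 'while len(poses) < num_robots' loop; `r` = number of poses still to emit, `sp` = seg - 1
def bLoop : Nat → Int → Int → Nat → Nat → Bool → List String
  | 0, _, _, _, _, _ => []
  | r + 1, x, y, d, sp, second =>
    let dxy := bDirs d
    let t := bSegGo (sp + 1) (r + 1) x y dxy.1 dxy.2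
    t.1 ++ bLoop (r + 1 - min (r + 1) (sp + 1)) t.2.1 t.2.2 ((d + 1) % 4)
               (if second then sp + 1 else sp) (!second)
  termination_by r => r
  decreasing_by omega

def bPoses (n : Int) : List String :=
  if n > 0 then bPose 0 0 :: bLoop (n.toNat - 1) 0 0 0 0 false else []

def bBlock (i : Int) (pose : String) : String :=
  "\n\n    <group ns=\"robot" ++ PySem.Int.toStr i ++
  "\">\n      <param name=\"tf_prefix\" value=\"robot" ++ PySem.Int.toStr i ++
  "_tf\" />\n      <include file=\"$(find volta_multi_robot_simulation)/launch/one_robot.launch\">\n        <arg name=\"init_pose\" value=\"" ++ pose ++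
  "\" />\n        <arg name=\"robot_name\"  value=\"Robot" ++ PySem.Int.toStr i ++
  "\" />\n      </include>\n    </group>\n      \n    "

def generate_launch_file_alt (num_robots : Int) : String :=
  let poses := bPoses num_robots
  let blocks := (PySem.List.enumerate poses 1).map (fun p => bBlock p.1 p.2)
  "\n    <launch>\n        <!-- No namespace here as we will share this description. Access with slash at the beginning -->\n        <param name=\"robot_description\" command=\"xacro '$(find volta_multi_robot_simulation)/urdf/volta.urdf.xacro'\"/>\n        "
    ++ PySem.Str.join "" blocks ++ "</launch>\n"

-- ===== PRECONDITION & SPEC =====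
def Spec_generate_launch_file (num_robots : Int) (out : String) : Prop := out = generate_launch_file_alt num_robots
instance (num_robots : Int) (out : String) : Decidable (Spec_generate_launch_file num_robots out) := by unfold Spec_generate_launch_file; infer_instance

-- ===== CLAIM (what is proved, stated in full; the proofs are below) =====
def Claim_equal_generate_launch_file : Prop := ∀ (num_robots : Int), Dom_generate_launch_file num_robots → Spec_generate_launch_file num_robots (generate_launch_file num_robots)

-- ===== LEMMAS AND PROOFS =====

-- A's turning predicate, named for the proofs
def pvTurn (x y : Int) : Prop := x = y ∨ (x < 0 ∧ x = -y) ∨ (x > 0 ∧ x = 1 - y)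

lemma aSpiralGo_succ_turn {x y : Int} (dx dy : Int) (m : Nat) (h : pvTurn x y) :
    aSpiralGo (m + 1) x y dx dy = (x, y) :: aSpiralGo m (x - dy) (y + dx) (-dy) dx := by
  have h' : x = y ∨ (x < 0 ∧ x = -y) ∨ (x > 0 ∧ x = 1 - y) := h
  simp only [aSpiralGo, if_pos h']
  norm_num [sub_eq_add_neg]

lemma aSpiralGo_succ_go {x y : Int} (dx dy : Int) (m : Nat) (h : ¬ pvTurn x y) :
    aSpiralGo (m + 1) x y dx dy = (x, y) :: aSpiralGo m (x + dx) (y + dy) dx dy := by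
  have h' : ¬ (x = y ∨ (x < 0 ∧ x = -y) ∨ (x > 0 ∧ x = 1 - y)) := h
  simp only [aSpiralGo, if_neg h']

-- a straight run shorter than the leg: no turn fires
lemma aLeg_part (dx dy : Int) : ∀ (m : Nat) (x y : Int),
    (∀ i : Nat, i < m → ¬ pvTurn (x + i * dx) (y + i * dy)) →
    aSpiralGo m x y dx dy = (List.range m).map (fun i : Nat => (x + i * dx, y + i * dy)) := by
  intro m
  induction m with
  | zero => intro x y _; simp [aSpiralGo]
  | succ r IH =>
    intro x y hint
    have h0 : ¬ pvTurn x y := by simpa using hint 0 (by omega)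
    rw [aSpiralGo_succ_go dx dy r h0]
    rw [IH (x + dx) (y + dy) (fun i hi => by
      have h2 : x + dx + (i : Int) * dx = x + ((i + 1 : Nat) : Int) * dx := by push_cast; ring
      have h3 : y + dy + (i : Int) * dy = y + ((i + 1 : Nat) : Int) * dy := by push_cast; ring
      rw [h2, h3]; exact hint (i + 1) (by omega))]
    rw [List.range_succ_eq_map, List.map_cons, List.map_map]
    congr 1
    · norm_num
    apply List.map_congr_left
    intro i _
    simp only [Function.comp_apply, Prod.mk.injEq]
    constructor <;> push_cast <;> ring

-- a full leg: turn fires exactly at the last of its L points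
lemma aLeg_full (dx dy : Int) : ∀ (L : Nat), 1 ≤ L → ∀ (m : Nat) (x y : Int), L ≤ m →
    (∀ i : Nat, i + 1 < L → ¬ pvTurn (x + i * dx) (y + i * dy)) →
    pvTurn (x + ((L - 1 : Nat) : Int) * dx) (y + ((L - 1 : Nat) : Int) * dy) →
    aSpiralGo m x y dx dy =
      (List.range L).map (fun i : Nat => (x + i * dx, y + i * dy)) ++
      aSpiralGo (m - L) (x + ((L - 1 : Nat) : Int) * dx - dy) (y + ((L - 1 : Nat) : Int) * dy + dx) (-dy) dx := by
  intro L
  induction L with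
  | zero => intro h; exact absurd h (by omega)
  | succ K IHK =>
    intro _ m x y hLm hint hend
    obtain ⟨r, rfl⟩ : ∃ r, m = r + 1 := ⟨m - 1, by omega⟩
    by_cases hK : K = 0
    · subst hK
      have hend' : pvTurn x y := by simpa using hend
      rw [aSpiralGo_succ_turn dx dy r hend']
      simp [sub_eq_add_neg]
    · have hK1 : 1 ≤ K := by omega
      have h0 : ¬ pvTurn x y := by simpa using hint 0 (by omega)
      have ecast : ((K - 1 : Nat) : Int) = (K : Int) - 1 := by omega
      have ecast2 : ((K + 1 - 1 : Nat) : Int) = (K : Int) := by omega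
      rw [aSpiralGo_succ_go dx dy r h0]
      rw [IHK hK1 r (x + dx) (y + dy) (by omega)
        (fun i hi => by
          have h2 : x + dx + (i : Int) * dx = x + ((i + 1 : Nat) : Int) * dx := by push_cast; ring
          have h3 : y + dy + (i : Int) * dy = y + ((i + 1 : Nat) : Int) * dy := by push_cast; ring
          rw [h2, h3]; exact hint (i + 1) (by omega))
        (by
          have h2 : x + dx + ((K - 1 : Nat) : Int) * dx = x + ((K + 1 - 1 : Nat) : Int) * dx := by
            rw [ecast, ecast2]; ring
          have h3 : y + dy + ((K - 1 : Nat) : Int) * dy = y + ((K + 1 - 1 : Nat) : Int) * dy := by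
            rw [ecast, ecast2]; ring
          rw [h2, h3]; exact hend)]
      rw [List.range_succ_eq_map, List.map_cons, List.map_map, List.cons_append]
      congr 1
      · norm_num
      congr 1
      · apply List.map_congr_left
        intro i _
        simp only [Function.comp_apply, Prod.mk.injEq]
        constructor <;> push_cast <;> ring
      · have e4 : r + 1 - (K + 1) = r - K := by omega
        rw [ecast, ecast2, e4]; ring_nf

lemma bPose_congr {a b c d : Int} (hx : a = c) (hy : b = d) : bPose a b = bPose c d := by
  rw [hx, hy]

lemma bSegGo_eq (dx dy : Int) : ∀ (s r : Nat) (x y : Int),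
    bSegGo s r x y dx dy =
      ((List.range (min s r)).map (fun i : Nat => bPose (x + (i + 1) * dx) (y + (i + 1) * dy)),
       x + ((min s r : Nat) : Int) * dx, y + ((min s r : Nat) : Int) * dy) := by
  intro s
  induction s with
  | zero => intro r x y; cases r <;> simp [bSegGo]
  | succ t IH =>
    intro r x y
    cases r with
    | zero => simp [bSegGo]
    | succ q =>
      simp only [bSegGo, IH]
      rw [Nat.succ_min_succ, List.range_succ_eq_map, List.map_cons, List.map_map]
      simp only [Prod.mk.injEq]
      refine ⟨?_, ?_, ?_⟩
      · congr 1
        · apply bPose_congr <;> push_cast <;> ring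
        · apply List.map_congr_left
          intro i _
          simp only [Function.comp_apply]
          apply bPose_congr <;> push_cast <;> ring
      · push_cast; ring
      · push_cast; ring

lemma bLoop_succ (r : Nat) (x y : Int) (d sp : Nat) (second : Bool) :
    bLoop (r + 1) x y d sp second =
      (bSegGo (sp + 1) (r + 1) x y (bDirs d).1 (bDirs d).2).1 ++
      bLoop (r + 1 - min (r + 1) (sp + 1)) (bSegGo (sp + 1) (r + 1) x y (bDirs d).1 (bDirs d).2).2.1
        (bSegGo (sp + 1) (r + 1) x y (bDirs d).1 (bDirs d).2).2.2 ((d + 1) % 4)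
        (if second then sp + 1 else sp) (!second) := by
  rw [bLoop]

-- head of a leg: A's mapped straight run is B's segment output
lemma pvHeadEq (x0 cx dx dy y0 cy : Int) (hx : x0 = cx + dx) (hy : y0 = cy + dy)
    (n m : Nat) (h : n = m) :
    (List.map (fun i : Nat => (x0 + i * dx, y0 + i * dy)) (List.range n)).map
        (fun c : Int × Int => bPose c.1 c.2)
      = (List.range m).map (fun i : Nat => bPose (cx + (i + 1) * dx) (cy + (i + 1) * dy)) := by
  subst h; subst hx; subst hy
  rw [List.map_map]
  apply List.map_congr_left
  intro i _
  simp only [Function.comp_apply]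
  apply bPose_congr <;> ring

-- the four legs of ring k: A's predicate-driven walk = B's segment walk, by strong induction on the remaining count
lemma pvMain : ∀ (m : Nat) (k : Nat), 1 ≤ k →
    ((aSpiralGo m (2 - (k : Int)) (1 - (k : Int)) 1 0).map (fun c => bPose c.1 c.2)
       = bLoop m (1 - (k : Int)) (1 - (k : Int)) 0 (2 * k - 2) false)
  ∧ ((aSpiralGo m (k : Int) (2 - (k : Int)) 0 1).map (fun c => bPose c.1 c.2)
       = bLoop m (k : Int) (1 - (k : Int)) 1 (2 * k - 2) true)
  ∧ ((aSpiralGo m ((k : Int) - 1) (k : Int) (-1) 0).map (fun c => bPose c.1 c.2)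
       = bLoop m (k : Int) (k : Int) 2 (2 * k - 1) false)
  ∧ ((aSpiralGo m (-(k : Int)) ((k : Int) - 1) 0 (-1)).map (fun c => bPose c.1 c.2)
       = bLoop m (-(k : Int)) (k : Int) 3 (2 * k - 1) true) := by
  intro m
  induction m using Nat.strong_induction_on with
  | _ m IH =>
  intro k hk
  match m with
  | 0 => refine ⟨?_, ?_, ?_, ?_⟩ <;> simp [aSpiralGo, bLoop]
  | r + 1 =>
    refine ⟨?_, ?_, ?_, ?_⟩
    · -- right leg, L = 2k-1
      rw [bLoop_succ, show bDirs 0 = (1, 0) from rfl, bSegGo_eq]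
      dsimp only
      by_cases hle : 2 * k - 1 ≤ r + 1
      · rw [aLeg_full 1 0 (2 * k - 1) (by omega) (r + 1) _ _ hle
          (fun i hi => by simp only [pvTurn, mul_one, mul_zero, add_zero]; omega)
          (by simp only [pvTurn, mul_one, mul_zero, add_zero]; omega)]
        rw [List.map_append]
        congr 1
        · exact pvHeadEq _ _ _ _ _ _ (by ring) (by ring) _ _ (by omega)
        · have h2 := (IH (r + 1 - (2 * k - 1)) (by omega) k hk).2.1
          have e1 : ((2 * k - 1 - 1 : Nat) : Int) = 2 * (k : Int) - 2 := by omega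
          convert h2 using 2
          all_goals try omega
          all_goals (rw [e1]; ring_nf)
      · rw [aLeg_part 1 0 (r + 1) _ _
          (fun i hi => by simp only [pvTurn, mul_one, mul_zero, add_zero]; omega)]
        have hz : r + 1 - min (r + 1) (2 * k - 2 + 1) = 0 := by omega
        rw [hz]
        simp only [bLoop, List.append_nil]
        exact pvHeadEq _ _ _ _ _ _ (by ring) (by ring) _ _ (by omega)
    · -- up leg, L = 2k-1
      rw [bLoop_succ, show bDirs 1 = (0, 1) from rfl, bSegGo_eq]
      dsimp only
      by_cases hle : 2 * k - 1 ≤ r + 1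
      · rw [aLeg_full 0 1 (2 * k - 1) (by omega) (r + 1) _ _ hle
          (fun i hi => by simp only [pvTurn, mul_one, mul_zero, add_zero]; omega)
          (by simp only [pvTurn, mul_one, mul_zero, add_zero]; omega)]
        rw [List.map_append]
        congr 1
        · exact pvHeadEq _ _ _ _ _ _ (by ring) (by ring) _ _ (by omega)
        · have h2 := (IH (r + 1 - (2 * k - 1)) (by omega) k hk).2.2.1
          have e1 : ((2 * k - 1 - 1 : Nat) : Int) = 2 * (k : Int) - 2 := by omega
          convert h2 using 2
          all_goals try omega
          all_goals try (simp only [reduceIte]; omega)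
          all_goals (rw [e1]; ring_nf)
      · rw [aLeg_part 0 1 (r + 1) _ _
          (fun i hi => by simp only [pvTurn, mul_one, mul_zero, add_zero]; omega)]
        have hz : r + 1 - min (r + 1) (2 * k - 2 + 1) = 0 := by omega
        rw [hz]
        simp only [bLoop, List.append_nil]
        exact pvHeadEq _ _ _ _ _ _ (by ring) (by ring) _ _ (by omega)
    · -- left leg, L = 2k
      rw [bLoop_succ, show bDirs 2 = (-1, 0) from rfl, bSegGo_eq]
      dsimp only
      by_cases hle : 2 * k ≤ r + 1
      · rw [aLeg_full (-1) 0 (2 * k) (by omega) (r + 1) _ _ hle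
          (fun i hi => by simp only [pvTurn, mul_neg_one, mul_zero, add_zero]; omega)
          (by simp only [pvTurn, mul_neg_one, mul_zero, add_zero]; omega)]
        rw [List.map_append]
        congr 1
        · exact pvHeadEq _ _ _ _ _ _ (by ring) (by ring) _ _ (by omega)
        · have h2 := (IH (r + 1 - 2 * k) (by omega) k hk).2.2.2
          have e2 : ((2 * k - 1 : Nat) : Int) = 2 * (k : Int) - 1 := by omega
          convert h2 using 2
          all_goals try omega
          all_goals (rw [e2]; ring_nf)
      · rw [aLeg_part (-1) 0 (r + 1) _ _
          (fun i hi => by simp only [pvTurn, mul_neg_one, mul_zero, add_zero]; omega)]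
        have hz : r + 1 - min (r + 1) (2 * k - 1 + 1) = 0 := by omega
        rw [hz]
        simp only [bLoop, List.append_nil]
        exact pvHeadEq _ _ _ _ _ _ (by ring) (by ring) _ _ (by omega)
    · -- down leg, L = 2k; hands over to ring k+1
      rw [bLoop_succ, show bDirs 3 = (0, -1) from rfl, bSegGo_eq]
      dsimp only
      by_cases hle : 2 * k ≤ r + 1
      · rw [aLeg_full 0 (-1) (2 * k) (by omega) (r + 1) _ _ hle
          (fun i hi => by simp only [pvTurn, mul_neg_one, mul_zero, add_zero]; omega)
          (by simp only [pvTurn, mul_neg_one, mul_zero, add_zero]; omega)]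
        rw [List.map_append]
        congr 1
        · exact pvHeadEq _ _ _ _ _ _ (by ring) (by ring) _ _ (by omega)
        · have h2 := (IH (r + 1 - 2 * k) (by omega) (k + 1) (by omega)).1
          have e2 : ((2 * k - 1 : Nat) : Int) = 2 * (k : Int) - 1 := by omega
          convert h2 using 2
          all_goals try omega
          all_goals try (simp only [reduceIte]; omega)
          all_goals (rw [e2]; push_cast; ring_nf)
      · rw [aLeg_part 0 (-1) (r + 1) _ _
          (fun i hi => by simp only [pvTurn, mul_neg_one, mul_zero, add_zero]; omega)]
        have hz : r + 1 - min (r + 1) (2 * k - 1 + 1) = 0 := by omega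
        rw [hz]
        simp only [bLoop, List.append_nil]
        exact pvHeadEq _ _ _ _ _ _ (by ring) (by ring) _ _ (by omega)

lemma length_aSpiralGo : ∀ (m : Nat) (x y dx dy : Int), (aSpiralGo m x y dx dy).length = m := by
  intro m
  induction m with
  | zero => intro x y dx dy; simp [aSpiralGo]
  | succ t IH => intro x y dx dy; simp [aSpiralGo, IH]

-- the two pose lists coincide
lemma pvPoses_eq (n : Int) : fill_init_poses n = bPoses n := by
  by_cases hn : n ≤ 0
  · simp [fill_init_poses, anticlockwise_spiral, bPoses, hn, if_neg (by omega : ¬ n > 0)]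
  · have ht : n.toNat = (n.toNat - 1) + 1 := by omega
    unfold fill_init_poses anticlockwise_spiral bPoses
    rw [if_neg hn, if_pos (by omega : n > 0), ht]
    rw [aSpiralGo_succ_turn 0 (-1) _ (Or.inl rfl)]
    have hfun : (fun c : Int × Int =>
        "-x " ++ PySem.Int.toStr c.1 ++ " -y " ++ PySem.Int.toStr c.2 ++ " -z 0")
        = (fun c : Int × Int => bPose c.1 c.2) := rfl
    rw [List.map_cons, hfun]
    have h1 := (pvMain (n.toNat - 1) 1 (by omega)).1
    norm_num at h1 ⊢
    exact ⟨rfl, h1⟩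

lemma pvPoses_len (n : Int) (hn : 0 < n) : (fill_init_poses n).length = n.toNat := by
  unfold fill_init_poses anticlockwise_spiral
  rw [if_neg (by omega : ¬ n ≤ 0)]
  simp [length_aSpiralGo]

lemma pvJoin_nil : PySem.Str.join "" [] = "" := by
  apply String.toList_inj.mp
  simp [PySem.Str.toList_join, PySem.Chars.join_nil]

lemma pvJoin_cons (x : String) (t : List String) :
    PySem.Str.join "" (x :: t) = x ++ PySem.Str.join "" t := by
  cases t with
  | nil => apply String.toList_inj.mp; simp [PySem.Chars.join_singleton, PySem.Chars.join_nil]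
  | cons q rest => apply String.toList_inj.mp; simp [PySem.Chars.join_cons_cons]

-- a string-accumulating loop is the join of the mapped pieces
lemma pvFoldl_str {α : Type} (f : α → String) : ∀ (l : List α) (acc : String),
    l.foldl (fun a x => a ++ f x) acc = acc ++ PySem.Str.join "" (l.map f) := by
  intro l
  induction l with
  | nil => intro acc; simp [pvJoin_nil]
  | cons x t IH =>
    intro acc
    simp only [List.foldl_cons, List.map_cons, pvJoin_cons, IH, String.append_assoc]

lemma pvEnum_shift (F : Int → String → String) : ∀ (xs : List String) (s t : Int),
    (PySem.List.enumerate xs s).map (fun p => F (p.1 + t) p.2)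
      = (PySem.List.enumerate xs (s + t)).map (fun p => F p.1 p.2) := by
  intro xs
  induction xs with
  | nil => intro s t; simp [PySem.List.enumerate]
  | cons x q IH =>
    intro s t
    simp only [PySem.List.enumerate, List.map_cons]
    rw [IH (s + 1) t, show s + 1 + t = s + t + 1 by ring]

-- A's indexed assembly loop enumerates the pose list
lemma pvBlocks_eq (poses : List String) (n : Int) (hn : 0 < n) (hl : poses.length = n.toNat) :
    (PySem.List.pyRange 0 n 1).map (fun i =>
        generate_robot_launch (i + 1)
          (PySem.List.pyGetD poses (PySem.Int.mod i (poses.length : Int)) ""))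
      = (PySem.List.enumerate poses 1).map (fun p => bBlock p.1 p.2) := by
  have hlen : (poses.length : Int) = n := by omega
  have hmod : ∀ i ∈ PySem.List.pyRange 0 n 1,
      generate_robot_launch (i + 1)
          (PySem.List.pyGetD poses (PySem.Int.mod i (poses.length : Int)) "")
        = generate_robot_launch (i + 1) (PySem.List.pyGetD poses i "") := by
    intro i hi
    rw [PySem.List.mem_pyRange_one] at hi
    rw [PySem.Int.mod_eq_emod_of_pos (by omega), Int.emod_eq_of_lt (by omega) (by omega)]
  rw [List.map_congr_left hmod, ← hlen]
  have he := PySem.List.enumerate_eq_map_pyRange poses ""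
  simp only [PySem.List.len_eq] at he
  have hshift := (pvEnum_shift (fun i s => bBlock i s) poses 0 1).symm
  norm_num at hshift
  rw [hshift, he, List.map_map]
  rfl

-- ===== VERDICT (by name: the statement is the Claim_ definition above) =====
theorem generate_launch_file_spec : Claim_equal_generate_launch_file := by
  unfold Claim_equal_generate_launch_file
  intro n _
  unfold Spec_generate_launch_file
  show generate_launch_file n = generate_launch_file_alt n
  unfold generate_launch_file generate_launch_file_alt
  dsimp only
  rw [pvFoldl_str, ← pvPoses_eq]
  by_cases hn : 0 < n
  · rw [pvBlocks_eq _ n hn (pvPoses_len n hn)]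
  · have h1 : PySem.List.pyRange 0 n 1 = [] := PySem.List.pyRange_one_eq_nil (by omega)
    have h2 : fill_init_poses n = [] := by
      simp [fill_init_poses, anticlockwise_spiral, if_pos (by omega : n ≤ 0)]
    rw [h1, h2]
    simp [PySem.List.enumerate, pvJoin_nil]
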